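-- pv_equiv track=rewrite | github.com/PurpleCosmic/AdventOfCode | day_9/solve.py | compact_filesystem
-- ===== SOURCE A (Python) =====
-- def compact_filesystem(filesystem):
--     res = list(filesystem)
--     sys_len = len(filesystem)
--     last_dot_pos = 0
--     for i in range(sys_len-1, 0, -1):
--         if res[i] != '.':
--             for j in range(last_dot_pos, i):
--                 if res[j] == '.':
--                     last_dot_pos = j
--                     res[i], res[j] = res[j], res[i]
--                     break
--     return res
-- ===== SOURCE B (Python) =====
-- def compact_filesystem(filesystem):
--     res = list(filesystem)
--     n = len(res)
--     dots = [i for i in range(n) if res[i] == '.']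
--     nondots = [i for i in range(n - 1, -1, -1) if res[i] != '.']
--     for d, r in zip(dots, nondots):
--         if d >= r:
--             break
--         res[d], res[r] = res[r], res[d]
--     return res
-- ===== Notes on version B (the rewrite author's own statement) =====
-- stated objective: faster
-- what changed: A repeatedly re-scans the array for the next dot inside a descending loop (quadratic once the dots left of the scan point run out); B builds the ascending dot-index list and the descending non-dot-index list once, zips them, and swaps each pair while the dot is left of the non-dot.
import Mathlib
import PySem

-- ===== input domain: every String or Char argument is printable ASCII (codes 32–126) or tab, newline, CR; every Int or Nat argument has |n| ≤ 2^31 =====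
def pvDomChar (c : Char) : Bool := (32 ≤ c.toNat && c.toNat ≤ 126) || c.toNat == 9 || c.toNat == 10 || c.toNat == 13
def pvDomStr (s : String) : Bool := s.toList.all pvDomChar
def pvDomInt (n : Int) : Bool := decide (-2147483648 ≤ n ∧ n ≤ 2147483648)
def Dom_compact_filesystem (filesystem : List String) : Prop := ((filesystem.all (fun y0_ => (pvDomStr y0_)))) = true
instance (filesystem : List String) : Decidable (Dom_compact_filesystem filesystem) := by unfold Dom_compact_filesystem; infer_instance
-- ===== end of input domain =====

-- B replaces A's quadratic scan-for-the-next-dot nested loops by one pairing pass: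
-- it lists the dot indices (ascending) and the non-dot indices (descending) once,
-- zips them, and swaps each pair while the dot lies left of the non-dot.

-- ===== PORT A =====
-- inner loop `for j in range(last_dot_pos, i): if res[j] == '.': break` of A
def findDot (res : List String) (i : Nat) (j : Nat) : Option Nat :=
  if _h : j < i then
    if res.getD j "" = "." then some j else findDot res i (j + 1)
  else none
termination_by i - j

-- outer loop `for i in range(sys_len-1, 0, -1)` of A, with the running (res, last_dot_pos)
def aLoop (res : List String) (ldp : Nat) (i : Nat) : List String :=
  if _h : i = 0 then res
  else
    if res.getD i "" ≠ "." then
      match findDot res i ldp with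
      | some j => aLoop ((res.set i (res.getD j "")).set j (res.getD i "")) j (i - 1)
      | none => aLoop res ldp (i - 1)
    else aLoop res ldp (i - 1)
termination_by i

def compact_filesystem (filesystem : List String) : List String :=
  aLoop filesystem 0 (filesystem.length - 1)

-- ===== PORT B =====
-- the `for d, r in zip(dots, nondots): if d >= r: break; swap` loop of B
def bApply (res : List String) : List (Nat × Nat) → List String
  | [] => res
  | (d, r) :: ps =>
      if d ≥ r then res
      else bApply ((res.set d (res.getD r "")).set r (res.getD d "")) ps

def compact_filesystem_alt (filesystem : List String) : List String :=
  bApply filesystem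
    (((List.range filesystem.length).filter (fun i => filesystem.getD i "" == ".")).zip
     (((List.range filesystem.length).reverse).filter (fun i => !(filesystem.getD i "" == "."))))

-- ===== PRECONDITION & SPEC =====
def Spec_compact_filesystem (filesystem : List String) (out : List String) : Prop := out = compact_filesystem_alt filesystem
instance (filesystem : List String) (out : List String) : Decidable (Spec_compact_filesystem filesystem out) := by unfold Spec_compact_filesystem; infer_instance

-- ===== CLAIM (what is proved, stated in full; the proofs are below) =====
def Claim_equal_compact_filesystem : Prop := ∀ (filesystem : List String), Dom_compact_filesystem filesystem → Spec_compact_filesystem filesystem (compact_filesystem filesystem)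

-- ===== LEMMAS AND PROOFS =====

-- indices k with a ≤ k < b whose entry is (iD = true) / is not (iD = false) a dot, ascending
def sIdx (res : List String) (iD : Bool) (a b : Nat) : List Nat :=
  (List.range' a (b - a)).filter (fun k => (res.getD k "" == ".") == iD)

theorem sIdx_nil (res : List String) (iD : Bool) {a b : Nat} (h : b ≤ a) :
    sIdx res iD a b = [] := by
  simp [sIdx, Nat.sub_eq_zero_of_le h]

theorem sIdx_split (res : List String) (iD : Bool) {a c b : Nat} (hac : a ≤ c) (hcb : c ≤ b) :
    sIdx res iD a b = sIdx res iD a c ++ sIdx res iD c b := by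
  unfold sIdx
  rw [← List.filter_append]
  have h : List.range' a (c - a) ++ List.range' (a + 1 * (c - a)) (b - c) =
      List.range' a ((c - a) + (b - c)) := List.range'_append
  have h1 : a + 1 * (c - a) = c := by omega
  have h2 : (c - a) + (b - c) = b - a := by omega
  rw [h1, h2] at h
  rw [← h]

theorem sIdx_single (res : List String) (iD : Bool) (a : Nat) :
    sIdx res iD a (a + 1) = if (res.getD a "" == ".") = iD then [a] else [] := by
  simp [sIdx, List.filter]
  split <;> simp_all

theorem mem_sIdx {res : List String} {iD : Bool} {a b k : Nat} (h : k ∈ sIdx res iD a b) :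
    a ≤ k ∧ k < b ∧ (res.getD k "" == ".") = iD := by
  unfold sIdx at h
  rcases List.mem_filter.mp h with ⟨hm, hp⟩
  rcases List.mem_range'.mp hm with ⟨t, ht, hk⟩
  exact ⟨by omega, by omega, by simpa using hp⟩

theorem sIdx_eq_nil_of (res : List String) (iD : Bool) {a b : Nat}
    (h : ∀ k, a ≤ k → k < b → ¬ ((res.getD k "" == ".") = iD)) :
    sIdx res iD a b = [] := by
  rw [List.eq_nil_iff_forall_not_mem]
  intro k hk
  rcases mem_sIdx hk with ⟨h1, h2, h3⟩
  exact h k h1 h2 h3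

theorem sIdx_set_ne (res : List String) (iD : Bool) {a b i : Nat} (v : String)
    (h : i < a ∨ b ≤ i) :
    sIdx (res.set i v) iD a b = sIdx res iD a b := by
  unfold sIdx
  apply List.filter_congr
  intro k hk
  rcases List.mem_range'.mp hk with ⟨t, ht, hkt⟩
  have hne : i ≠ k := by omega
  rw [List.getD, List.getElem?_set_ne hne, ← List.getD]

theorem getD_set_ne (res : List String) {i k : Nat} (v : String) (h : i ≠ k) :
    (res.set i v).getD k "" = res.getD k "" := by
  rw [List.getD, List.getElem?_set_ne h, ← List.getD]

theorem getD_set_self (res : List String) {i : Nat} (v : String) (h : i < res.length) :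
    (res.set i v).getD i "" = v := by
  simp [List.getD, h]

-- findDot characterisations
theorem findDot_none_aux {res : List String} {i : Nat} :
    ∀ n j, i ≤ j + n → findDot res i j = none →
      ∀ k, j ≤ k → k < i → res.getD k "" ≠ "." := by
  intro n
  induction n with
  | zero => intro j hj _ k hk1 hk2; omega
  | succ n ih =>
      intro j hj h k hk1 hk2
      rw [findDot] at h
      by_cases hlt : j < i
      · rw [dif_pos hlt] at h
        by_cases hdot : res.getD j "" = "."
        · rw [if_pos hdot] at h; exact absurd h (by simp)
        · rw [if_neg hdot] at h
          rcases Nat.eq_or_lt_of_le hk1 with he | hl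
          · subst he; exact hdot
          · exact ih (j + 1) (by omega) h k hl hk2
      · omega

theorem findDot_none {res : List String} {i j : Nat} (h : findDot res i j = none) :
    ∀ k, j ≤ k → k < i → res.getD k "" ≠ "." :=
  findDot_none_aux i j (by omega) h

theorem findDot_some_aux {res : List String} {i j' : Nat} :
    ∀ n j, i ≤ j + n → findDot res i j = some j' →
      j ≤ j' ∧ j' < i ∧ res.getD j' "" = "." ∧ ∀ k, j ≤ k → k < j' → res.getD k "" ≠ "." := by
  intro n
  induction n with
  | zero =>
      intro j hj h
      rw [findDot, dif_neg (by omega : ¬ j < i)] at h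
      exact absurd h (by simp)
  | succ n ih =>
      intro j hj h
      rw [findDot] at h
      by_cases hlt : j < i
      · rw [dif_pos hlt] at h
        by_cases hdot : res.getD j "" = "."
        · rw [if_pos hdot] at h
          cases h
          exact ⟨Nat.le_refl _, hlt, hdot, fun k hk1 hk2 => by omega⟩
        · rw [if_neg hdot] at h
          rcases ih (j + 1) (by omega) h with ⟨h1, h2, h3, h4⟩
          refine ⟨by omega, h2, h3, ?_⟩
          intro k hk1 hk2
          rcases Nat.eq_or_lt_of_le hk1 with he | hl
          · subst he; exact hdot
          · exact h4 k hl hk2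
      · rw [dif_neg hlt] at h; exact absurd h (by simp)

theorem findDot_some {res : List String} {i j j' : Nat} (h : findDot res i j = some j') :
    j ≤ j' ∧ j' < i ∧ res.getD j' "" = "." ∧ ∀ k, j ≤ k → k < j' → res.getD k "" ≠ "." :=
  findDot_some_aux i j (by omega) h

-- inserting a too-large dot index m into the dot list after the cut point changes nothing
theorem bApply_insert_d (A : List Nat) : ∀ (res : List String) (rs : List Nat) (ds' : List Nat) (m : Nat),
    (∀ d ∈ ds', ∀ r ∈ rs, r ≤ d) → (∀ r ∈ rs, r ≤ m) →
    bApply res ((A ++ ds').zip rs) = bApply res ((A ++ m :: ds').zip rs) := by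
  induction A with
  | nil =>
      intro res rs ds' m h1 h2
      cases rs with
      | nil => simp [bApply]
      | cons r rs' =>
          cases ds' with
          | nil => simp [bApply, h2 r (by simp)]
          | cons d ds'' =>
              simp only [List.nil_append, List.zip_cons_cons, bApply]
              rw [if_pos (h1 d (by simp) r (by simp)), if_pos (h2 r (by simp))]
  | cons a A' ih =>
      intro res rs ds' m h1 h2
      cases rs with
      | nil => simp [bApply]
      | cons r rs' =>
          simp only [List.cons_append, List.zip_cons_cons, bApply]
          split
          · rfl
          · exact ih _ rs' ds' m (fun d hd r' hr' => h1 d hd r' (by simp [hr']))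
              (fun r' hr' => h2 r' (by simp [hr']))

-- inserting a too-small non-dot index j into the non-dot list after the cut point changes nothing
theorem bApply_insert_r (X : List Nat) : ∀ (res : List String) (ds : List Nat) (Y : List Nat) (j : Nat),
    (∀ d ∈ ds, j ≤ d) → (∀ y ∈ Y, y ≤ j) →
    bApply res (ds.zip (X ++ Y)) = bApply res (ds.zip (X ++ j :: Y)) := by
  induction X with
  | nil =>
      intro res ds Y j h1 h2
      cases ds with
      | nil => simp [bApply]
      | cons d ds' =>
          cases Y with
          | nil => simp [bApply, h1 d (by simp)]
          | cons y Y' =>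
              simp only [List.nil_append, List.zip_cons_cons, bApply]
              rw [if_pos (Nat.le_trans (h2 y (by simp)) (h1 d (by simp))), if_pos (h1 d (by simp))]
  | cons x X' ih =>
      intro res ds Y j h1 h2
      cases ds with
      | nil => simp [bApply]
      | cons d ds' =>
          simp only [List.cons_append, List.zip_cons_cons, bApply]
          split
          · rfl
          · exact ih _ ds' Y j (fun d' hd' => h1 d' (by simp [hd'])) h2

-- unfolding equations for A's loop
theorem aLoop_zero (res : List String) (ldp : Nat) : aLoop res ldp 0 = res := by
  rw [aLoop]
  simp

theorem aLoop_dot (res : List String) (ldp i : Nat) (hi : i ≠ 0)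
    (hd : res.getD i "" = ".") : aLoop res ldp i = aLoop res ldp (i - 1) := by
  rw [aLoop, dif_neg hi, if_neg (not_not.mpr hd)]

theorem aLoop_none (res : List String) (ldp i : Nat) (hi : i ≠ 0)
    (hd : res.getD i "" ≠ ".") (hf : findDot res i ldp = none) :
    aLoop res ldp i = aLoop res ldp (i - 1) := by
  rw [aLoop, dif_neg hi, if_pos hd, hf]

theorem aLoop_some (res : List String) (ldp i j : Nat) (hi : i ≠ 0)
    (hd : res.getD i "" ≠ ".") (hf : findDot res i ldp = some j) :
    aLoop res ldp i = aLoop ((res.set i (res.getD j "")).set j (res.getD i "")) j (i - 1) := by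
  rw [aLoop, dif_neg hi, if_pos hd, hf]

-- main loop invariant: A's loop from index i equals B's pairing loop on the current state
theorem aLoop_eq : ∀ (res : List String) (ldp i : Nat), i < res.length →
    aLoop res ldp i =
      bApply res ((sIdx res true ldp res.length).zip ((sIdx res false 1 (i + 1)).reverse)) := by
  intro res ldp i
  induction res, ldp, i using aLoop.induct with
  | case1 res ldp =>
      intro _hlen
      rw [aLoop_zero, (by norm_num : (0:Nat) + 1 = 1), sIdx_nil res false (Nat.le_refl 1)]
      simp [bApply]
  | case2 res ldp i hi hnd j hf ih =>
      intro hlen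
      rcases findDot_some hf with ⟨hj1, hj2, hj3, hj4⟩
      have hjlen : j < res.length := by omega
      have hgj : ((res.set i (res.getD j "")).set j (res.getD i "")).getD j "" = res.getD i "" :=
        getD_set_self _ _ (by rw [List.length_set]; omega)
      have hgi : ((res.set i (res.getD j "")).set j (res.getD i "")).getD i "" = res.getD j "" := by
        rw [getD_set_ne _ _ (by omega : j ≠ i), getD_set_self _ _ (by omega : i < res.length)]
      -- decompose the dot list of res
      have hdots : sIdx res true ldp res.length = j :: sIdx res true (j + 1) res.length := by
        rw [sIdx_split res true hj1 (by omega : j ≤ res.length),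
            sIdx_split res true (by omega : j ≤ j + 1) (by omega : j + 1 ≤ res.length),
            sIdx_eq_nil_of res true (fun k h1 h2 h3 => hj4 k h1 h2 (beq_iff_eq.mp h3)),
            sIdx_single, if_pos (beq_iff_eq.mpr hj3)]
        simp
      -- decompose the non-dot list of res up to i
      have hrs : sIdx res false 1 (i + 1) = sIdx res false 1 i ++ [i] := by
        rw [sIdx_split res false (by omega : 1 ≤ i) (by omega : i ≤ i + 1),
            sIdx_single, if_pos (beq_eq_false_iff_ne.mpr hnd)]
      have hD1 : sIdx res true (j + 1) res.length =
          sIdx res true (j + 1) i ++ sIdx res true (i + 1) res.length := by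
        rw [sIdx_split res true (by omega : j + 1 ≤ i) (by omega : i ≤ res.length),
            sIdx_split res true (by omega : i ≤ i + 1) (by omega : i + 1 ≤ res.length),
            sIdx_single, if_neg (fun hcon => hnd (beq_iff_eq.mp hcon))]
        simp
      -- dot list of the swapped array
      have hmidA : sIdx ((res.set i (res.getD j "")).set j (res.getD i "")) true (j + 1) i =
          sIdx res true (j + 1) i := by
        rw [sIdx_set_ne _ _ _ (by omega : j < j + 1 ∨ i ≤ j),
            sIdx_set_ne _ _ _ (by omega : i < j + 1 ∨ i ≤ i)]
      have htailD : sIdx ((res.set i (res.getD j "")).set j (res.getD i "")) true (i + 1) res.length =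
          sIdx res true (i + 1) res.length := by
        rw [sIdx_set_ne _ _ _ (by omega : j < i + 1 ∨ res.length ≤ j),
            sIdx_set_ne _ _ _ (by omega : i < i + 1 ∨ res.length ≤ i)]
      have hdots' : sIdx ((res.set i (res.getD j "")).set j (res.getD i "")) true j res.length =
          sIdx res true (j + 1) i ++ i :: sIdx res true (i + 1) res.length := by
        rw [sIdx_split _ true (by omega : j ≤ j + 1) (by omega : j + 1 ≤ res.length),
            sIdx_split _ true (by omega : j + 1 ≤ i) (by omega : i ≤ res.length),
            sIdx_split _ true (by omega : i ≤ i + 1) (by omega : i + 1 ≤ res.length),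
            sIdx_single, if_neg (fun hcon => hnd (by rw [← hgj]; exact beq_iff_eq.mp hcon)),
            sIdx_single, if_pos (by rw [hgi]; exact beq_iff_eq.mpr hj3),
            hmidA, htailD]
        simp
      -- bounds used by the cut lemmas
      have hA2b : ∀ d ∈ sIdx res true (j + 1) i, j + 1 ≤ d ∧ d < i :=
        fun d hd => ⟨(mem_sIdx hd).1, (mem_sIdx hd).2.1⟩
      have hds'b : ∀ d ∈ sIdx res true (i + 1) res.length, i + 1 ≤ d :=
        fun d hd => (mem_sIdx hd).1
      have hXb : ∀ r ∈ (sIdx res false 1 i).reverse, 1 ≤ r ∧ r < i := by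
        intro r hr
        rw [List.mem_reverse] at hr
        exact ⟨(mem_sIdx hr).1, (mem_sIdx hr).2.1⟩
      -- one swap, then the pairing loop continues on the swapped array
      have hstep : bApply res
            ((j :: (sIdx res true (j + 1) i ++ sIdx res true (i + 1) res.length)).zip
              ((sIdx res false 1 i ++ [i]).reverse)) =
          bApply ((res.set i (res.getD j "")).set j (res.getD i ""))
            ((sIdx res true (j + 1) i ++ sIdx res true (i + 1) res.length).zip
              ((sIdx res false 1 i).reverse)) := by
        rw [List.reverse_append]
        simp only [List.reverse_singleton, List.singleton_append, List.zip_cons_cons, bApply]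
        rw [if_neg (by omega : ¬ j ≥ i),
            ← List.set_comm (res.getD j "") (res.getD i "") (by omega : i ≠ j)]
      have ih' := ih (by rw [List.length_set, List.length_set]; omega)
      rw [List.length_set, List.length_set, (by omega : i - 1 + 1 = i), hdots'] at ih'
      rw [aLoop_some res ldp i j hi hnd hf, ih', hdots, hrs, hD1, hstep]
      -- the two pairing loops on the swapped array agree
      by_cases hj0 : j = 0
      · have hX' : sIdx ((res.set i (res.getD j "")).set j (res.getD i "")) false 1 i =
            sIdx res false 1 i := by
          rw [sIdx_set_ne _ _ _ (by omega : j < 1 ∨ i ≤ j),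
              sIdx_set_ne _ _ _ (by omega : i < 1 ∨ i ≤ i)]
        rw [hX']
        exact (bApply_insert_d (sIdx res true (j + 1) i) _ ((sIdx res false 1 i).reverse)
          (sIdx res true (i + 1) res.length) i
          (fun d hd r hr => by have := hds'b d hd; have := hXb r hr; omega)
          (fun r hr => by have := hXb r hr; omega)).symm
      · have hY0 : sIdx res false 1 i = sIdx res false 1 j ++ sIdx res false (j + 1) i := by
          rw [sIdx_split res false (by omega : 1 ≤ j) (by omega : j ≤ i),
              sIdx_split res false (by omega : j ≤ j + 1) (by omega : j + 1 ≤ i),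
              sIdx_single, if_neg (fun hcon => (beq_eq_false_iff_ne.mp hcon) hj3)]
          simp
        have hX' : sIdx ((res.set i (res.getD j "")).set j (res.getD i "")) false 1 i =
            sIdx res false 1 j ++ j :: sIdx res false (j + 1) i := by
          rw [sIdx_split _ false (by omega : 1 ≤ j) (by omega : j ≤ i),
              sIdx_split _ false (by omega : j ≤ j + 1) (by omega : j + 1 ≤ i),
              sIdx_single, if_pos (by rw [hgj]; exact beq_eq_false_iff_ne.mpr hnd),
              sIdx_set_ne _ _ _ (by omega : j < 1 ∨ j ≤ j),
              sIdx_set_ne _ _ _ (by omega : i < 1 ∨ j ≤ i),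
              sIdx_set_ne _ _ _ (by omega : j < j + 1 ∨ i ≤ j),
              sIdx_set_ne _ _ _ (by omega : i < j + 1 ∨ i ≤ i)]
          simp
        have hY0b : ∀ y ∈ (sIdx res false 1 j).reverse, y ≤ j := by
          intro y hy
          rw [List.mem_reverse] at hy
          have := (mem_sIdx hy).2.1
          omega
        have hX2b : ∀ r ∈ (sIdx res false (j + 1) i).reverse, j + 1 ≤ r ∧ r < i := by
          intro r hr
          rw [List.mem_reverse] at hr
          exact ⟨(mem_sIdx hr).1, (mem_sIdx hr).2.1⟩
        have e1 : (sIdx res false 1 j ++ j :: sIdx res false (j + 1) i).reverse =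
            (sIdx res false (j + 1) i).reverse ++ j :: (sIdx res false 1 j).reverse := by
          simp
        have e2 : (sIdx res false 1 j ++ sIdx res false (j + 1) i).reverse =
            (sIdx res false (j + 1) i).reverse ++ (sIdx res false 1 j).reverse := by
          simp
        rw [hX', hY0, e1, e2]
        rw [bApply_insert_r ((sIdx res false (j + 1) i).reverse) _
              (sIdx res true (j + 1) i ++ sIdx res true (i + 1) res.length)
              ((sIdx res false 1 j).reverse) j
              (by
                intro d hd
                rcases List.mem_append.mp hd with h | h
                · have := hA2b d h; omega
                · have := hds'b d h; omega)
              hY0b]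
        exact (bApply_insert_d (sIdx res true (j + 1) i) _
          ((sIdx res false (j + 1) i).reverse ++ j :: (sIdx res false 1 j).reverse)
          (sIdx res true (i + 1) res.length) i
          (by
            intro d hd r hr
            have hdi := hds'b d hd
            rcases List.mem_append.mp hr with h | h
            · have := hX2b r h; omega
            · rcases List.mem_cons.mp h with h | h
              · omega
              · have := hY0b r h; omega)
          (by
            intro r hr
            rcases List.mem_append.mp hr with h | h
            · have := hX2b r h; omega
            · rcases List.mem_cons.mp h with h | h
              · omega
              · have := hY0b r h; omega)).symm
  | case3 res ldp i hi hnd hf ih =>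
      intro hlen
      have hnod := findDot_none hf
      have hrs : sIdx res false 1 (i + 1) = sIdx res false 1 i ++ [i] := by
        rw [sIdx_split res false (by omega : 1 ≤ i) (by omega : i ≤ i + 1),
            sIdx_single, if_pos (beq_eq_false_iff_ne.mpr hnd)]
      rw [aLoop_none res ldp i hi hnd hf, ih (by omega), (by omega : i - 1 + 1 = i), hrs]
      rw [List.reverse_append]
      simp only [List.reverse_singleton, List.singleton_append]
      -- every remaining dot index is ≥ i, so both sides stop immediately (or the lists are empty)
      cases hds : sIdx res true ldp res.length with
      | nil => simp [bApply]
      | cons d ds'' =>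
          have hdmem : d ∈ sIdx res true ldp res.length := by rw [hds]; simp
          have hdge : i ≤ d := by
            rcases mem_sIdx hdmem with ⟨h1, h2, h3⟩
            by_contra hcon
            exact hnod d h1 (by omega) (beq_iff_eq.mp h3)
          cases hxs : (sIdx res false 1 i).reverse with
          | nil =>
              simp only [List.zip_nil_right, List.zip_cons_cons, bApply]
              rw [if_pos (by omega : d ≥ i)]
          | cons x xs' =>
              have hxmem : x ∈ sIdx res false 1 i := by
                rw [← List.mem_reverse, hxs]; simp
              have hxi : x < i := (mem_sIdx hxmem).2.1
              simp only [List.zip_cons_cons, bApply]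
              rw [if_pos (by omega : d ≥ i), if_pos (by omega : d ≥ x)]
  | case4 res ldp i hi hdot ih =>
      intro hlen
      have hd : res.getD i "" = "." := not_not.mp hdot
      have hrs : sIdx res false 1 (i + 1) = sIdx res false 1 i := by
        rw [sIdx_split res false (by omega : 1 ≤ i) (by omega : i ≤ i + 1),
            sIdx_single, if_neg (fun hcon => (beq_eq_false_iff_ne.mp hcon) hd)]
        simp
      rw [aLoop_dot res ldp i hi hd, ih (by omega), (by omega : i - 1 + 1 = i), hrs]

-- bridging B's comprehensions with sIdx
theorem dots_eq (l : List String) :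
    (List.range l.length).filter (fun i => l.getD i "" == ".") = sIdx l true 0 l.length := by
  rw [sIdx, List.range_eq_range', Nat.sub_zero]
  apply List.filter_congr
  intro k _
  cases h : l.getD k "" == "." with
  | false => simp
  | true => simp

theorem nondots_eq (l : List String) :
    ((List.range l.length).reverse).filter (fun i => !(l.getD i "" == ".")) =
      (sIdx l false 0 l.length).reverse := by
  rw [List.filter_reverse]
  congr 1
  rw [sIdx, List.range_eq_range', Nat.sub_zero]
  apply List.filter_congr
  intro k _
  cases h : l.getD k "" == "." with
  | false => simp
  | true => simp

-- ===== VERDICT (by name: the statement is the Claim_ definition above) =====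
theorem compact_filesystem_spec : Claim_equal_compact_filesystem := by
  unfold Claim_equal_compact_filesystem
  intro l _hdom
  unfold Spec_compact_filesystem compact_filesystem compact_filesystem_alt
  by_cases hlen : l.length = 0
  · have hnil : l = [] := List.length_eq_zero_iff.mp hlen
    subst hnil
    have h0 : ([] : List String).length - 1 = 0 := rfl
    rw [h0, aLoop_zero]
    rfl
  · rw [aLoop_eq l 0 (l.length - 1) (by omega), (by omega : l.length - 1 + 1 = l.length)]
    rw [dots_eq, nondots_eq]
    have hsplit : sIdx l false 0 l.length = sIdx l false 0 1 ++ sIdx l false 1 l.length := by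
      rw [← sIdx_split l false (by omega : (0:Nat) ≤ 1) (by omega : 1 ≤ l.length)]
    rw [hsplit, List.reverse_append]
    by_cases h0 : l.getD 0 "" = "."
    · have hsing : sIdx l false 0 1 = [] := by
        have h := sIdx_single l false 0
        rw [if_neg (fun hcon => (beq_eq_false_iff_ne.mp hcon) h0)] at h
        simpa using h
      rw [hsing]
      simp
    · have hsing : sIdx l false 0 1 = [0] := by
        have h := sIdx_single l false 0
        rw [if_pos (beq_eq_false_iff_ne.mpr h0)] at h
        simpa using h
      rw [hsing]
      simp only [List.reverse_singleton]
      conv_lhs => rw [← List.append_nil ((sIdx l false 1 l.length).reverse)]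
      rw [bApply_insert_r ((sIdx l false 1 l.length).reverse) l _ [] 0
        (fun d _ => Nat.zero_le d) (fun y hy => by simp at hy)]
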